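-- pv_equiv track=rewrite | github.com/unixpickle/treeagent-py | treeagent/build.py | _divide_up_work
-- ===== SOURCE A (Python) =====
-- def _divide_up_work(work, num_workers):
--     """
--     Divide the work (a list of values) into at most
--     num_workers sub-lists which are as balanced as
--     possible.
--     """
--     common_size = len(work) // num_workers
--     extra_size = len(work) % num_workers
--     res = []
--     for i in range(num_workers):
--         if i < extra_size:
--             res.append(work[i*(common_size+1):(i+1)*(common_size+1)])
--         elif common_size > 0:
--             extra_off = extra_size + common_size*extra_size
--             cur_off = (i-extra_size)*common_size + extra_off
--             res.append(work[cur_off:cur_off+common_size])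
--     return res
-- ===== SOURCE B (Python) =====
-- def _divide_up_work(work, num_workers):
--     """
--     Divide the work (a list of values) into at most
--     num_workers sub-lists which are as balanced as
--     possible.
--     """
--     res = []
--     off = 0
--     workers = num_workers
--     while workers > 0 and off < len(work):
--         size = -((off - len(work)) // workers)
--         res.append(work[off:off + size])
--         off += size
--         workers -= 1
--     return res
-- ===== Notes on version B (the rewrite author's own statement) =====
-- stated objective: simpler
-- what changed: Replaced A's indexed range(num_workers) loop with two precomputed slice formulas (common_size/extra_size, branch on i < extra_size) by an offset-accumulator while-loop that repeatedly peels off a ceil(remaining/workers)-sized chunk and stops early when the list is exhausted.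
import Mathlib
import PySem

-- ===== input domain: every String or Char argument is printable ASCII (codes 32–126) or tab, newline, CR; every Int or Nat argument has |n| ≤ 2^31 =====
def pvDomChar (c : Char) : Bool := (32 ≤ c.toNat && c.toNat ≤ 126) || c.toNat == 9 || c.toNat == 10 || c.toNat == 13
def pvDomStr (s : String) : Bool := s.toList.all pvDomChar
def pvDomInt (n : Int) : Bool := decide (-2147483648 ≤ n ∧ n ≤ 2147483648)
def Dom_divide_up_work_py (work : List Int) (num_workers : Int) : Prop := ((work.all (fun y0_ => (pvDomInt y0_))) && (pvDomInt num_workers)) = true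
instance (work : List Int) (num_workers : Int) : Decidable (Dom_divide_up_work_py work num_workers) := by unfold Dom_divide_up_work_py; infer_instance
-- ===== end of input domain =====

-- B replaces A's indexed loop with precomputed common/extra slice formulas by an
-- offset-accumulator loop peeling off a ceil(remaining/workers)-sized chunk each step
-- (objective: simpler; same asymptotic cost).

-- ===== PORT A =====
def divide_up_work_py (work : List Int) (num_workers : Int) : List (List Int) :=
  let common_size := PySem.Int.floordiv (work.length : Int) num_workers
  let extra_size := PySem.Int.mod (work.length : Int) num_workers
  (PySem.List.pyRange 0 num_workers 1).foldl
    (fun res i =>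
      if i < extra_size then
        res ++ [PySem.List.slice work (some (i * (common_size + 1))) (some ((i + 1) * (common_size + 1)))]
      else if common_size > 0 then
        let extra_off := extra_size + common_size * extra_size
        let cur_off := (i - extra_size) * common_size + extra_off
        res ++ [PySem.List.slice work (some cur_off) (some (cur_off + common_size))]
      else res) []

-- ===== PORT B =====
def alt_go (work : List Int) (off : Int) (workers : Int) (res : List (List Int)) : List (List Int) :=
  if h : workers > 0 ∧ off < (work.length : Int) then
    let size := -(PySem.Int.floordiv (off - (work.length : Int)) workers)
    alt_go work (off + size) (workers - 1) (res ++ [PySem.List.slice work (some off) (some (off + size))])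
  else res
termination_by workers.toNat
decreasing_by
  have h1 : 0 < workers := h.1
  omega

def divide_up_work_py_alt (work : List Int) (num_workers : Int) : List (List Int) :=
  alt_go work 0 num_workers []

-- ===== PRECONDITION & SPEC =====
-- Pre_ excludes exactly num_workers = 0, where A raises ZeroDivisionError (B returns [] there).
def Pre_divide_up_work_py (work : List Int) (num_workers : Int) : Prop := num_workers ≠ 0
instance (work : List Int) (num_workers : Int) : Decidable (Pre_divide_up_work_py work num_workers) := by unfold Pre_divide_up_work_py; infer_instance
def pvWitness_divide_up_work_py : List Int × Int := ([1, 2, 3, 4, 5], 3)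


def Spec_divide_up_work_py (work : List Int) (num_workers : Int) (out : List (List Int)) : Prop := out = divide_up_work_py_alt work num_workers
instance (work : List Int) (num_workers : Int) (out : List (List Int)) : Decidable (Spec_divide_up_work_py work num_workers out) := by unfold Spec_divide_up_work_py; infer_instance

-- ===== CLAIM (what is proved, stated in full; the proofs are below) =====
def Claim_equal_divide_up_work_py : Prop := ∀ (work : List Int) (num_workers : Int), Dom_divide_up_work_py work num_workers → Pre_divide_up_work_py work num_workers → Spec_divide_up_work_py work num_workers (divide_up_work_py work num_workers)

-- ===== LEMMAS AND PROOFS =====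

lemma alt_go_stop (work : List Int) (off workers : Int) (res : List (List Int))
    (h : ¬ (workers > 0 ∧ off < (work.length : Int))) : alt_go work off workers res = res := by
  rw [alt_go, dif_neg h]

lemma fold_chunks (work : List Int) (c e : Int) (hc : 0 ≤ c) (he : 0 ≤ e) :
    ∀ (m : Nat) (a : Int) (res : List (List Int)),
    0 ≤ a → e ≤ a + m → (work.length : Int) = (a + m) * c + e →
    (PySem.List.pyRange a (a + m) 1).foldl
      (fun res i =>
        if i < e then
          res ++ [PySem.List.slice work (some (i * (c + 1))) (some ((i + 1) * (c + 1)))]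
        else if c > 0 then
          res ++ [PySem.List.slice work (some ((i - e) * c + (e + c * e))) (some ((i - e) * c + (e + c * e) + c))]
        else res) res
    = alt_go work (a * c + min a e) ((m : Int)) res := by
  intro m
  induction m with
  | zero =>
    intro a res ha hea hlen
    rw [PySem.List.pyRange_one_eq_nil (by omega)]
    rw [alt_go_stop _ _ _ _ (by rintro ⟨h1, _⟩; omega)]
    rfl
  | succ m ih =>
    intro a res ha hea hlen
    have hcast : a + ((m + 1 : Nat) : Int) = (a + 1) + (m : Int) := by push_cast; ring
    rw [hcast] at hlen ⊢
    rw [PySem.List.pyRange_one_cons (by omega)]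
    rw [List.foldl_cons]
    have hmn : 0 ≤ a * c := mul_nonneg ha hc
    have hr0 : 0 ≤ ((m : Int) + 1) * c := mul_nonneg (by omega) hc
    by_cases hae : a < e
    · -- front-loaded chunk of size c+1
      have hmin : min a e = a := by omega
      have hmin' : min (a + 1) e = a + 1 := by omega
      rw [if_pos hae, hmin]
      have hsum : (work.length : Int) = (a * c + a) + (((m : Int) + 1) * c + (e - a)) := by
        rw [hlen]; ring
      conv_rhs => rw [alt_go]
      rw [dif_pos (by constructor <;> [skip; omega] <;> · push_cast; omega)]
      have hsize : -(PySem.Int.floordiv ((a * c + a) - (work.length : Int)) (((m + 1 : Nat) : Int))) = c + 1 := by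
        rw [show (a * c + a) - (work.length : Int) = -((work.length : Int) - (a * c + a)) from by ring]
        rw [PySem.Int.neg_floordiv_neg_eq_iff_of_pos (by push_cast; omega)]
        constructor
        · rw [show (c + 1 - 1) * (((m + 1 : Nat)) : Int) = ((m : Int) + 1) * c from by push_cast; ring]
          omega
        · rw [show (c + 1) * (((m + 1 : Nat)) : Int) = ((m : Int) + 1) * c + ((m : Int) + 1) from by push_cast; ring]
          omega
      simp only [hsize]
      rw [show a * (c + 1) = a * c + a from by ring]
      rw [show (a + 1) * (c + 1) = (a * c + a) + (c + 1) from by ring]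
      rw [show (((m + 1 : Nat)) : Int) - 1 = (m : Int) from by push_cast; ring]
      have hkey := ih (a + 1) (res ++ [PySem.List.slice work (some (a * c + a)) (some (a * c + a + (c + 1)))]) (by omega) (by omega) hlen
      rw [hmin'] at hkey
      rw [show (a + 1) * c + (a + 1) = a * c + a + (c + 1) from by ring] at hkey
      exact hkey
    · rw [if_neg hae]
      have hmin : min a e = e := by omega
      have hmin' : min (a + 1) e = e := by omega
      rw [hmin]
      by_cases hcp : c > 0
      · rw [if_pos hcp]
        have hsum : (work.length : Int) = (a * c + e) + ((m : Int) + 1) * c := by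
          rw [hlen]; ring
        have hrp : 0 < ((m : Int) + 1) * c := mul_pos (by omega) hcp
        conv_rhs => rw [alt_go]
        rw [dif_pos (by constructor <;> [skip; omega] <;> · push_cast; omega)]
        have hsize : -(PySem.Int.floordiv ((a * c + e) - (work.length : Int)) (((m + 1 : Nat) : Int))) = c := by
          rw [show (a * c + e) - (work.length : Int) = -((work.length : Int) - (a * c + e)) from by ring]
          rw [PySem.Int.neg_floordiv_neg_eq_iff_of_pos (by push_cast; omega)]
          constructor
          · rw [show (c - 1) * (((m + 1 : Nat)) : Int) = ((m : Int) + 1) * c - ((m : Int) + 1) from by push_cast; ring]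
            omega
          · rw [show c * (((m + 1 : Nat)) : Int) = ((m : Int) + 1) * c from by push_cast; ring]
            omega
        simp only [hsize]
        rw [show (a - e) * c + (e + c * e) = a * c + e from by ring]
        rw [show (((m + 1 : Nat)) : Int) - 1 = (m : Int) from by push_cast; ring]
        have hkey := ih (a + 1) (res ++ [PySem.List.slice work (some (a * c + e)) (some (a * c + e + c))]) (by omega) (by omega) hlen
        rw [hmin'] at hkey
        rw [show (a + 1) * c + e = a * c + e + c from by ring] at hkey
        exact hkey
      · rw [if_neg hcp]
        have hc0 : c = 0 := by omega
        subst hc0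
        have hkey := ih (a + 1) res (by omega) (by omega) hlen
        rw [hmin'] at hkey
        rw [hkey]
        have hl : (work.length : Int) = e := by rw [hlen]; ring
        rw [alt_go_stop _ _ _ _ (by rintro ⟨h1, h2⟩; omega)]
        rw [alt_go_stop _ _ _ _ (by rintro ⟨h1, h2⟩; omega)]

theorem divide_up_work_py_spec : Claim_equal_divide_up_work_py := by
  intro work n _ hpre
  unfold Spec_divide_up_work_py divide_up_work_py_alt
  simp only [divide_up_work_py]
  by_cases hn : n ≤ 0
  · rw [PySem.List.pyRange_one_eq_nil hn]
    rw [alt_go_stop _ _ _ _ (by rintro ⟨h1, _⟩; omega)]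
    rfl
  · push_neg at hn
    have hc : 0 ≤ PySem.Int.floordiv (work.length : Int) n := by
      rw [PySem.Int.floordiv_eq_ediv_of_pos hn]
      exact Int.ediv_nonneg (by positivity) (le_of_lt hn)
    have he : 0 ≤ PySem.Int.mod (work.length : Int) n := PySem.Int.mod_nonneg _ hn
    have helt : PySem.Int.mod (work.length : Int) n < n := PySem.Int.mod_lt _ hn
    have hml := PySem.Int.floordiv_mul_add_mod (work.length : Int) n
    have hnn : ((n.toNat : Nat) : Int) = n := Int.toNat_of_nonneg (le_of_lt hn)
    have key := fold_chunks work (PySem.Int.floordiv (work.length : Int) n)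
      (PySem.Int.mod (work.length : Int) n) hc he n.toNat 0 [] le_rfl (by omega)
      (by rw [zero_add, hnn, mul_comm]; omega)
    rw [zero_add, hnn] at key
    rw [show min (0 : Int) (PySem.Int.mod (work.length : Int) n) = 0 from by omega] at key
    simp only [zero_mul, zero_add] at key
    exact key
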